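-- pv_equiv track=rewrite | github.com/avinashmishra26/python-code | shiftingletters.py | shiftingLetters1
-- ===== SOURCE A (Python) =====
-- def shiftingLetters1(s: str, shifts) -> str:
--     res = '';
--     for idx in range(len(s)):
--         uni_val = (ord(s[idx]) + sum(shifts[idx:]) %26 )
--         if uni_val >= (97 + 26):
--             uni_val -= 26
--         res += chr(uni_val)
--
--
--     return res
-- ===== SOURCE B (Python) =====
-- def shiftingLetters1(s: str, shifts) -> str:
--     n = len(s)
--     total = sum(shifts[n:])
--     out = []
--     for i in range(n - 1, -1, -1):
--         if i < len(shifts):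
--             total += shifts[i]
--         c = ord(s[i]) + total % 26
--         if c >= 123:
--             c -= 26
--         out.append(chr(c))
--     return ''.join(reversed(out))
-- ===== Notes on version B (the rewrite author's own statement) =====
-- stated objective: faster
-- what changed: Replaces A's recomputation of sum(shifts[idx:]) at every index (a fresh slice+sum per character) with a single right-to-left pass that maintains the running suffix total, building the characters back-to-front and reversing once.
import Mathlib
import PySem

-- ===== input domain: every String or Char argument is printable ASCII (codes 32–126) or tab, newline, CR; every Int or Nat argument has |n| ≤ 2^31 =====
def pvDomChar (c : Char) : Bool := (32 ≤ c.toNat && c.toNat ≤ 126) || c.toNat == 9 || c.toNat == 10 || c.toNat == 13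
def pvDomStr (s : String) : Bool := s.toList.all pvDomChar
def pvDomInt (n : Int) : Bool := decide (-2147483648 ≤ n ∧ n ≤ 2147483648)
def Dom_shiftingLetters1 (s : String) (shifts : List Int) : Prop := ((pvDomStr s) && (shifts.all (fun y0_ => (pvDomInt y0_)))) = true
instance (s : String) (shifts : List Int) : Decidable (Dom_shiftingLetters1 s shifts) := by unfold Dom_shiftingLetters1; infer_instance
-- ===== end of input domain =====

-- B replaces A's per-index recomputation of sum(shifts[idx:]) (quadratic) by one right-to-left
-- pass that maintains the running suffix total (objective: faster, asymptotic).

-- ===== PORT A =====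
-- ord/chr have no PySem primitive: ported by hand as Char.toNat / Char.ofNat, exact on the
-- ASCII domain (the produced code point is always a valid Char here).
def shiftingLetters1 (s : String) (shifts : List Int) : String :=
  let chars := s.toList
  let res := (PySem.List.pyRange 0 (chars.length : Int)).foldl (fun res idx =>
    let uniVal : Int :=
      ((PySem.List.pyGetD chars idx ' ').toNat : Int) +
        PySem.Int.mod ((PySem.List.slice shifts (some idx) none).sum) 26
    let uniVal := if uniVal ≥ 97 + 26 then uniVal - 26 else uniVal
    res ++ [Char.ofNat uniVal.toNat]) []
  String.mk res

-- ===== PORT B =====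
-- the countdown loop 'for i in range(n-1, -1, -1)' of Source B as structural recursion on i;
-- state = (running suffix total, out list built by append); ord/chr by hand as in port A.
def shiftingLetters1AltGo (chars : List Char) (shifts : List Int) :
    Nat → Int → List Char → List Char
  | 0, _, out => out
  | i + 1, total, out =>
      let total := if (i : Int) < (shifts.length : Int)
                   then total + PySem.List.pyGetD shifts (i : Int) 0 else total
      let c : Int := ((chars.getD i ' ').toNat : Int) + PySem.Int.mod total 26
      let c := if c ≥ 123 then c - 26 else c
      shiftingLetters1AltGo chars shifts i total (out ++ [Char.ofNat c.toNat])

def shiftingLetters1_alt (s : String) (shifts : List Int) : String :=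
  let chars := s.toList
  let n := chars.length
  let total := (PySem.List.slice shifts (some (n : Int)) none).sum
  String.mk (shiftingLetters1AltGo chars shifts n total []).reverse

-- ===== PRECONDITION & SPEC =====
def Spec_shiftingLetters1 (s : String) (shifts : List Int) (out : String) : Prop := out = shiftingLetters1_alt s shifts
instance (s : String) (shifts : List Int) (out : String) : Decidable (Spec_shiftingLetters1 s shifts out) := by unfold Spec_shiftingLetters1; infer_instance

-- ===== CLAIM (what is proved, stated in full; the proofs are below) =====
def Claim_equal_shiftingLetters1 : Prop := ∀ (s : String) (shifts : List Int), Dom_shiftingLetters1 s shifts → Spec_shiftingLetters1 s shifts (shiftingLetters1 s shifts)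

-- ===== LEMMAS AND PROOFS =====

-- A's per-index character (what both loops compute at index i)
def shiftF (chars : List Char) (shifts : List Int) (i : Nat) : Char :=
  let v : Int := ((chars.getD i ' ').toNat : Int) + PySem.Int.mod ((shifts.drop i).sum) 26
  let v := if v ≥ 123 then v - 26 else v
  Char.ofNat v.toNat

lemma drop_sum_step (shifts : List Int) (i : Nat) :
    (if (i : Int) < (shifts.length : Int)
     then (shifts.drop (i+1)).sum + shifts.getD i 0
     else (shifts.drop (i+1)).sum) = (shifts.drop i).sum := by
  split_ifs with h
  · have hi : i < shifts.length := by exact_mod_cast h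
    rw [List.drop_eq_getElem_cons hi, List.sum_cons, List.getD_eq_getElem shifts 0 hi]
    ring
  · have hi : shifts.length ≤ i := by omega
    rw [List.drop_eq_nil_of_le hi, List.drop_eq_nil_of_le (by omega)]

lemma altGo_spec (chars : List Char) (shifts : List Int) :
    ∀ (i : Nat) (acc : List Char),
      shiftingLetters1AltGo chars shifts i ((shifts.drop i).sum) acc
        = acc ++ ((List.range i).map (shiftF chars shifts)).reverse := by
  intro i
  induction i with
  | zero => intro acc; simp [shiftingLetters1AltGo]
  | succ i ih =>
      intro acc
      rw [shiftingLetters1AltGo]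
      simp only [PySem.List.pyGetD_natCast, drop_sum_step]
      rw [ih]
      simp [List.range_succ, shiftF]

theorem shiftingLetters1_spec : Claim_equal_shiftingLetters1 := by
  intro s shifts _
  unfold Spec_shiftingLetters1 shiftingLetters1 shiftingLetters1_alt
  simp only [PySem.List.slice_from_natCast]
  rw [altGo_spec]
  rw [PySem.List.pyRange_zero_natCast, List.foldl_map,
      PySem.List.foldl_append_singleton_eq_map]
  simp only [List.nil_append, List.reverse_reverse]
  congr 1
  apply List.map_congr_left
  intro i hi
  simp only [PySem.List.pyGetD_natCast, PySem.List.slice_from_natCast, shiftF]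
  norm_num
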